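-- pv_equiv track=rewrite | github.com/pwborthwick/harpy | source/fci.py | configurations
-- ===== SOURCE A (Python) =====
-- def combinationList(combs, group, start, stop, level):
--     #compute the combinations for taking n things k at a time
--
--     for i in range(start, stop+1):
--
--         if level == 0:
--             s = (group + ',' + str(i))[1:]
--             combs.append(list(map(int, s.split(','))))
--
--         combinationList(combs, group + ',' + str(i), i+1, stop, level-1)
--
--     return combs
--
-- def configurations(nElectrons, nOrbitals, type = 'S'):
--
--     determinants = []
--     pad = nOrbitals - nElectrons
--
--     def subDeterminant(n, k, bit):
--         #components of full determinant
--
--         sub = []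
--         comb = []
--         combinationList(comb, '', 0, n-1, k)
--
--         for i in comb:
--             s = bit[0] * n
--             for j in range(k+1):
--                 s = s[:i[j]] + bit[1] + s[i[j]+1:]
--             sub.append(s)
--
--         return sub
--
--     #groundstate
--     if 'G' in type:
--         determinants.append('1' * nElectrons + '0' * pad)
--
--     #generate groundstate single excitations
--     if ('S' in type) and (nElectrons > 0):
--
--         pre = subDeterminant(nElectrons, 0, '10')
--         post = subDeterminant(pad, 0, '01')
--
--         for i in pre:
--             for j in post:
--                 determinants.append(i+j)
--
--     #generate groundstate double excitations
--     if ('D' in type) and (nElectrons > 1):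
--
--         pre = subDeterminant(nElectrons, 1, '10')
--         post = subDeterminant(pad, 1, '01')
--
--         for i in pre:
--             for j in post:
--                 determinants.append(i+j)
--
--     #generate groundstate triple excitations
--     if ('T' in type) and (nElectrons > 2):
--
--         pre = subDeterminant(nElectrons, 2, '10')
--         post = subDeterminant(pad, 2, '01')
--
--         for i in pre:
--             for j in post:
--                 determinants.append(i+j)
--
--     #generate groundstate quadruples excitations
--     if ('Q' in type) and (nElectrons > 3):
--
--         pre = subDeterminant(nElectrons, 3, '10')
--         post = subDeterminant(pad, 3, '01')
--
--         for i in pre: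
--             for j in post:
--                 determinants.append(i+j)
--
--     #sort determinants into major alpha order
--     determinants.sort()
--
--     return determinants
-- ===== SOURCE B (Python) =====
-- def _combs(lo, n, r):
--     # combinations of range(lo, n), size r, lexicographic (take-lo / skip-lo recursion)
--     if r == 0:
--         return [[]]
--     if lo >= n:
--         return []
--     return [[lo] + rest for rest in _combs(lo + 1, n, r - 1)] + _combs(lo + 1, n, r)
--
-- def configurations(nElectrons, nOrbitals, type='S'):
--     pad = nOrbitals - nElectrons
--     determinants = []
--     if 'G' in type:
--         determinants.append('1' * nElectrons + '0' * pad)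
--     for sym, k in (('S', 0), ('D', 1), ('T', 2), ('Q', 3)):
--         if sym in type and nElectrons > k:
--             pre = [''.join('0' if p in c else '1' for p in range(nElectrons))
--                    for c in _combs(0, nElectrons, k + 1)]
--             post = [''.join('1' if p in c else '0' for p in range(pad))
--                     for c in _combs(0, pad, k + 1)]
--             determinants += [i + j for i in pre for j in post]
--     determinants.sort()
--     return determinants
-- ===== Notes on version B (the rewrite author's own statement) =====
-- stated objective: simpler
-- what changed: Replaces A's string-encoded recursive combination generator (build ',0,1,..' strings, slice, split, re-parse with int) and its four copy-pasted excitation blocks by a direct take/skip list recursion for combinations, membership-based string construction, and one table-driven loop over the S/D/T/Q levels. Pre_ excludes only inputs where an active excitation branch drives the recursion depth (~nElectrons or ~pad) past CPython's recursion limit, where A raises RecursionError (B's own recursion raises there too).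
import Mathlib
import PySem

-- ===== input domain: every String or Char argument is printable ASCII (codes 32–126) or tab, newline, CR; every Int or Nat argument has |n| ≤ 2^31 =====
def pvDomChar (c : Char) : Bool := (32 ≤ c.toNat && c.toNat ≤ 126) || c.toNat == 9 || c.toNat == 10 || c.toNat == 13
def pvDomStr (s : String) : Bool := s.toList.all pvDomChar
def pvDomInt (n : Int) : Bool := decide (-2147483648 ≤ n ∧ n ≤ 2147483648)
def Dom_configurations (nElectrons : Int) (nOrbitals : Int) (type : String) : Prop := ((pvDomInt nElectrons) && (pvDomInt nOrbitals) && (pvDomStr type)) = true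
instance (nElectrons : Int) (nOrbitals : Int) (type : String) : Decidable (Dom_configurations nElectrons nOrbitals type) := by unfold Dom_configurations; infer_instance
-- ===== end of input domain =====

-- B replaces A's string-encoded combination recursion (build ',0,1,…', slice, split, re-parse with
-- int) and four copy-pasted excitation blocks by a direct take/skip list recursion plus one
-- table-driven loop: simpler, same asymptotic cost.

-- ===== PORT A =====

-- hand port of int(tok): exact on the canonical str(n) tokens this program produces (optional '-'
-- then decimal digits, no whitespace/underscores/'+'), which is the only shape combinationList
-- ever parses (PySem.Int.ofStr? agrees there; its definition uses private helpers).
def pyCanonVal (cs : List Char) : Int := cs.foldl (fun a c => 10 * a + ((c.toNat : Int) - 48)) 0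

def pyIntCanon (s : String) : Int :=
  match s.toList with
  | '-' :: ds => -(pyCanonVal ds)
  | ds => pyCanonVal ds

def combinationListGo (fuel : Nat) (combs : List (List Int)) (group : String)
    (start stop level : Int) : List (List Int) :=
  -- Python's 'for i in range(start, stop+1)': fuel is the exact remaining iteration count
  match fuel with
  | 0 => combs
  | f + 1 =>
    -- if level == 0: s = (group + ',' + str(i))[1:]; combs.append(list(map(int, s.split(','))))
    let combs1 := if level = 0 then
        combs ++ [(((PySem.Str.split?
            (PySem.Str.slice (group ++ "," ++ PySem.Int.toStr start) (some 1) none) ",").getD []).map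
            pyIntCanon)]
      else combs
    let combs2 := combinationListGo f combs1 (group ++ "," ++ PySem.Int.toStr start) (start + 1) stop (level - 1)
    combinationListGo f combs2 group (start + 1) stop level

def combinationList (combs : List (List Int)) (group : String) (start stop level : Int) :
    List (List Int) :=
  combinationListGo (stop + 1 - start).toNat combs group start stop level

def subDeterminant (n k : Int) (bit : String) : List String :=
  let comb := combinationList [] "" 0 (n - 1) k
  comb.foldl (fun sub i =>
    -- s = bit[0] * n  (bit is always the 2-char literal '10' or '01', so the getD never fires)
    let s0 : List Char := List.replicate n.toNat ((PySem.Str.pyGet? bit 0).getD ' ')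
    -- for j in range(k+1): s = s[:i[j]] + bit[1] + s[i[j]+1:]
    let s := (PySem.List.pyRange 0 (k + 1)).foldl (fun s j =>
        let idx := PySem.List.pyGetD i j 0
        PySem.Chars.slice s none (some idx) ++ [(PySem.Str.pyGet? bit 1).getD ' '] ++
          PySem.Chars.slice s (some (idx + 1)) none) s0
    sub ++ [String.ofList s]) []

def configurations (nElectrons : Int) (nOrbitals : Int) (type : String) : List String :=
  let pad := nOrbitals - nElectrons
  let determinants : List String := []
  let determinants := if PySem.Str.isIn "G" type then
      determinants ++ [String.ofList (List.replicate nElectrons.toNat '1' ++ List.replicate pad.toNat '0')]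
    else determinants
  let determinants := if PySem.Str.isIn "S" type && decide (0 < nElectrons) then
      let pre := subDeterminant nElectrons 0 "10"
      let post := subDeterminant pad 0 "01"
      pre.foldl (fun d i => post.foldl (fun d j => d ++ [i ++ j]) d) determinants
    else determinants
  let determinants := if PySem.Str.isIn "D" type && decide (1 < nElectrons) then
      let pre := subDeterminant nElectrons 1 "10"
      let post := subDeterminant pad 1 "01"
      pre.foldl (fun d i => post.foldl (fun d j => d ++ [i ++ j]) d) determinants
    else determinants
  let determinants := if PySem.Str.isIn "T" type && decide (2 < nElectrons) then
      let pre := subDeterminant nElectrons 2 "10"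
      let post := subDeterminant pad 2 "01"
      pre.foldl (fun d i => post.foldl (fun d j => d ++ [i ++ j]) d) determinants
    else determinants
  let determinants := if PySem.Str.isIn "Q" type && decide (3 < nElectrons) then
      let pre := subDeterminant nElectrons 3 "10"
      let post := subDeterminant pad 3 "01"
      pre.foldl (fun d i => post.foldl (fun d j => d ++ [i ++ j]) d) determinants
    else determinants
  PySem.List.sorted determinants (fun s => s) false

-- ===== PORT B =====

-- combinations of range(lo, n) of size r, lexicographic: take-lo / skip-lo recursion; the
-- 'lo >= n' stop test is carried as the exact Nat descent (n - lo).toNat (0 iff lo >= n)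
def combsBGo (fuel : Nat) (lo n r : Int) : List (List Int) :=
  if r = 0 then [[]]
  else match fuel with
  | 0 => []
  | f + 1 => (combsBGo f (lo + 1) n (r - 1)).map (lo :: ·) ++ combsBGo f (lo + 1) n r

def combsB (lo n r : Int) : List (List Int) := combsBGo (n - lo).toNat lo n r

-- ''.join('<inC>' if p in c else '<outC>' for p in range(n)) — a join of 1-char strings is ofList
def excString (c : List Int) (n : Int) (inC outC : Char) : String :=
  String.ofList ((PySem.List.pyRange 0 n).map (fun p => if p ∈ c then inC else outC))

def configurations_alt (nElectrons : Int) (nOrbitals : Int) (type : String) : List String :=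
  let pad := nOrbitals - nElectrons
  let base := if PySem.Str.isIn "G" type then
      [String.ofList (List.replicate nElectrons.toNat '1' ++ List.replicate pad.toNat '0')]
    else []
  let dets := [("S", (0 : Int)), ("D", 1), ("T", 2), ("Q", 3)].foldl (fun dets sk =>
      if PySem.Str.isIn sk.1 type && decide (sk.2 < nElectrons) then
        let pre := (combsB 0 nElectrons (sk.2 + 1)).map (fun c => excString c nElectrons '0' '1')
        let post := (combsB 0 pad (sk.2 + 1)).map (fun c => excString c pad '1' '0')
        dets ++ pre.flatMap (fun i => post.map (fun j => i ++ j))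
      else dets) base
  PySem.List.sorted dets (fun s => s) false

-- ===== PRECONDITION & SPEC =====
-- Pre_ excludes only the inputs on which A RAISES: when an excitation branch is active, both
-- combinationList's recursion (depth ~ nElectrons resp. pad) and B's _combs recursion exceed
-- CPython's recursion limit past ~10^4, so A (and B) raise RecursionError there; the bound 9000
-- leaves a frame margin below that limit.
def Pre_configurations (nElectrons : Int) (nOrbitals : Int) (type : String) : Prop :=
  ((PySem.Str.isIn "S" type = true ∧ 0 < nElectrons) ∨
   (PySem.Str.isIn "D" type = true ∧ 1 < nElectrons) ∨
   (PySem.Str.isIn "T" type = true ∧ 2 < nElectrons) ∨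
   (PySem.Str.isIn "Q" type = true ∧ 3 < nElectrons)) →
    nElectrons ≤ 9000 ∧ nOrbitals - nElectrons ≤ 9000
instance (nElectrons : Int) (nOrbitals : Int) (type : String) : Decidable (Pre_configurations nElectrons nOrbitals type) := by unfold Pre_configurations; infer_instance

def pvWitness_configurations : Int × Int × String := (3, 6, "GSD")

def Spec_configurations (nElectrons : Int) (nOrbitals : Int) (type : String) (out : List String) : Prop := out = configurations_alt nElectrons nOrbitals type
instance (nElectrons : Int) (nOrbitals : Int) (type : String) (out : List String) : Decidable (Spec_configurations nElectrons nOrbitals type out) := by unfold Spec_configurations; infer_instance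

-- ===== CLAIM (what is proved, stated in full; the proofs are below) =====
def Claim_equal_configurations : Prop := ∀ (nElectrons : Int) (nOrbitals : Int) (type : String), Dom_configurations nElectrons nOrbitals type → Pre_configurations nElectrons nOrbitals type → Spec_configurations nElectrons nOrbitals type (configurations nElectrons nOrbitals type)

-- ===== LEMMAS AND PROOFS =====

-- ---- decimal digits: Nat.toDigitsCore facts ----

theorem tdc_fuel (n : Nat) : ∀ f1 f2 ds, n < f1 → n < f2 →
    Nat.toDigitsCore 10 f1 n ds = Nat.toDigitsCore 10 f2 n ds := by
  induction n using Nat.strong_induction_on with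
  | _ n ih =>
    intro f1 f2 ds h1 h2
    match f1, f2 with
    | a + 1, b + 1 =>
      simp only [Nat.toDigitsCore]
      by_cases h : n / 10 = 0
      · simp [h]
      · simp only [h, if_false]
        exact ih (n / 10) (by omega) a b _ (by omega) (by omega)

theorem tdc_shift (f : Nat) : ∀ n ds, Nat.toDigitsCore 10 f n ds = Nat.toDigitsCore 10 f n [] ++ ds := by
  induction f with
  | zero => intro n ds; simp [Nat.toDigitsCore]
  | succ f ih =>
    intro n ds
    simp only [Nat.toDigitsCore]
    by_cases h : n / 10 = 0
    · simp [h]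
    · simp only [h, if_false]
      rw [ih (n / 10) ((n % 10).digitChar :: ds), ih (n / 10) [(n % 10).digitChar]]
      simp

theorem toDigits_step (n : Nat) (h : 10 ≤ n) :
    Nat.toDigits 10 n = Nat.toDigits 10 (n / 10) ++ [Nat.digitChar (n % 10)] := by
  unfold Nat.toDigits
  conv_lhs => simp only [Nat.toDigitsCore]
  have h10 : n / 10 ≠ 0 := by omega
  simp only [h10, if_false]
  rw [tdc_fuel (n / 10) n (n / 10 + 1) _ (by omega) (by omega), tdc_shift]

theorem digitChar_isDigit (d : Nat) (h : d < 10) : (Nat.digitChar d).isDigit = true := by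
  interval_cases d <;> decide

theorem toDigits_isDigit (n : Nat) : ∀ c ∈ Nat.toDigits 10 n, c.isDigit = true := by
  induction n using Nat.strong_induction_on with
  | _ n ih =>
    by_cases h : 10 ≤ n
    · rw [toDigits_step n h]
      intro c hc
      rcases List.mem_append.1 hc with hc | hc
      · exact ih (n / 10) (by omega) c hc
      · simp at hc; subst hc; exact digitChar_isDigit _ (by omega)
    · unfold Nat.toDigits
      simp only [Nat.toDigitsCore]
      have h10 : n / 10 = 0 := by omega
      simp only [h10, if_true]
      intro c hc; simp at hc; subst hc
      exact digitChar_isDigit _ (by omega)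

theorem pyCanonVal_append (xs : List Char) (c : Char) :
    pyCanonVal (xs ++ [c]) = 10 * pyCanonVal xs + ((c.toNat : Int) - 48) := by
  simp [pyCanonVal, List.foldl_append]

theorem pyCanonVal_toDigits (n : Nat) : pyCanonVal (Nat.toDigits 10 n) = (n : Int) := by
  induction n using Nat.strong_induction_on with
  | _ n ih =>
    by_cases h : 10 ≤ n
    · rw [toDigits_step n h, pyCanonVal_append, ih (n / 10) (by omega)]
      have h10 : n % 10 < 10 := by omega
      have : ((n % 10).digitChar.toNat : Int) - 48 = (n % 10 : Nat) := by
        set d := n % 10 with hd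
        interval_cases d <;> decide
      rw [this]
      push_cast
      omega
    · unfold Nat.toDigits
      simp only [Nat.toDigitsCore]
      have h10 : n / 10 = 0 := by omega
      have hm : n % 10 = n := by omega
      simp only [h10, if_true, hm]
      have hn : n < 10 := by omega
      interval_cases n <;> decide

theorem toChars_isCanon (x : Int) : ∀ c ∈ PySem.Int.toChars x, c.isDigit = true ∨ c = '-' := by
  unfold PySem.Int.toChars
  split_ifs with h
  · intro c hc
    rcases List.mem_cons.1 hc with hc | hc
    · right; exact hc
    · left; exact toDigits_isDigit _ c hc
  · intro c hc; left; exact toDigits_isDigit _ c hc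

theorem pyIntCanon_toChars (x : Int) : pyIntCanon (String.ofList (PySem.Int.toChars x)) = x := by
  unfold pyIntCanon
  simp only [String.toList_ofList]
  split
  · rename_i ds hds
    unfold PySem.Int.toChars at hds
    split_ifs at hds with h
    · injection hds with _ h2
      subst h2
      rw [pyCanonVal_toDigits]
      omega
    · exfalso
      have hd := toDigits_isDigit x.toNat '-' (by rw [hds]; simp)
      simp [Char.isDigit] at hd
  · rename_i hnot
    unfold PySem.Int.toChars
    split_ifs with h
    · exact (hnot (Nat.toDigits 10 x.natAbs) (by
        unfold PySem.Int.toChars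
        simp [h])).elim
    · rw [pyCanonVal_toDigits]
      omega

-- ---- s.split(',') on the canonical group strings ----

def mySplit (pre : List Char) : List Char → List (List Char)
  | [] => [pre]
  | c :: rest => if c = ',' then pre :: mySplit [] rest else mySplit (pre ++ [c]) rest

theorem splitOn_go_eq (l : List Char) : ∀ fuel cur acc, l.length < fuel →
    PySem.Chars.splitOn.go [','] fuel l cur acc = acc.reverse ++ mySplit cur.reverse l := by
  induction l with
  | nil =>
    intro fuel cur acc h
    match fuel with
    | f + 1 => simp [PySem.Chars.splitOn.go, mySplit]
  | cons c rest ih =>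
    intro fuel cur acc h
    match fuel with
    | f + 1 =>
      simp only [PySem.Chars.splitOn.go]
      by_cases hc : c = ','
      · subst hc
        have hp : [','].isPrefixOf (',' :: rest) = true := by simp [List.isPrefixOf]
        simp only [hp, if_true]
        have hdrop : List.drop [','].length (',' :: rest) = rest := by simp
        rw [hdrop]
        have hl : rest.length < f := by simp at h; omega
        rw [ih f [] (cur.reverse :: acc) hl]
        simp [mySplit]
      · have hp : [','].isPrefixOf (c :: rest) = false := by
          simp [List.isPrefixOf]
          intro hh
          exact absurd hh.symm hc
        simp only [hp]
        have hl : rest.length < f := by simp at h; omega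
        rw [ih f (c :: cur) acc hl]
        simp [mySplit, hc]

theorem splitOn_comma (s : List Char) : PySem.Chars.splitOn s [','] = mySplit [] s := by
  unfold PySem.Chars.splitOn
  rw [splitOn_go_eq s (s.length + 1) [] [] (by omega)]
  simp

theorem mySplit_no_comma (a : List Char) (h : ',' ∉ a) : ∀ pre, mySplit pre a = [pre ++ a] := by
  induction a with
  | nil => intro pre; simp [mySplit]
  | cons c rest ih =>
    intro pre
    have hc : c ≠ ',' := fun hh => h (by simp [hh])
    simp only [mySplit, hc, if_false]
    rw [ih (fun hh => h (List.mem_cons_of_mem _ hh)) (pre ++ [c])]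
    simp

theorem mySplit_append (a : List Char) (h : ',' ∉ a) :
    ∀ pre b, mySplit pre (a ++ ',' :: b) = (pre ++ a) :: mySplit [] b := by
  induction a with
  | nil => intro pre b; simp [mySplit]
  | cons c rest ih =>
    intro pre b
    have hc : c ≠ ',' := fun hh => h (by simp [hh])
    simp only [List.cons_append, mySplit, hc, if_false]
    rw [ih (fun hh => h (List.mem_cons_of_mem _ hh)) (pre ++ [c]) b]
    simp

def enc (l : List Int) : List Char := l.flatMap (fun x => ',' :: PySem.Int.toChars x)

theorem toChars_no_comma (x : Int) : ',' ∉ PySem.Int.toChars x := by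
  intro hm
  rcases toChars_isCanon x ',' hm with h | h
  · simp [Char.isDigit] at h
  · simp at h

theorem mySplit_enc (x : Int) (xs : List Int) :
    mySplit [] (PySem.Int.toChars x ++ enc xs) = PySem.Int.toChars x :: xs.map PySem.Int.toChars := by
  induction xs generalizing x with
  | nil =>
    simp only [enc, List.flatMap_nil, List.append_nil, List.map_nil]
    rw [mySplit_no_comma _ (toChars_no_comma x) []]
    simp
  | cons y ys ih =>
    have he : enc (y :: ys) = ',' :: (PySem.Int.toChars y ++ enc ys) := by simp [enc]
    rw [he, mySplit_append _ (toChars_no_comma x) [] _, ih y]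
    simp

theorem parse_enc (l : List Int) (hl : l ≠ []) :
    (PySem.Chars.splitOn ((enc l).drop 1) [',']).map (fun t => pyIntCanon (String.ofList t)) = l := by
  match l, hl with
  | x :: xs, _ =>
    have he : enc (x :: xs) = ',' :: (PySem.Int.toChars x ++ enc xs) := by simp [enc]
    rw [he]
    simp only [List.drop_succ_cons, List.drop_zero]
    rw [splitOn_comma, mySplit_enc]
    simp only [List.map_cons, List.map_map]
    rw [pyIntCanon_toChars]
    congr 1
    rw [show ((fun t => pyIntCanon (String.ofList t)) ∘ PySem.Int.toChars) = fun x => pyIntCanon (String.ofList (PySem.Int.toChars x)) from rfl]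
    exact List.map_congr_left (fun a _ => pyIntCanon_toChars a) |>.trans (List.map_id _)

-- ---- combinationList = specCombs = combsB ----

def specCombsGo (fuel : Nat) (l : List Int) (start stop level : Int) : List (List Int) :=
  match fuel with
  | 0 => []
  | f + 1 =>
    (if level = 0 then [l ++ [start]] else []) ++
      specCombsGo f (l ++ [start]) (start + 1) stop (level - 1) ++
      specCombsGo f l (start + 1) stop level

def specCombs (l : List Int) (start stop level : Int) : List (List Int) :=
  specCombsGo (stop + 1 - start).toNat l start stop level

theorem combListGo_spec (fuel : Nat) (stop : Int) :
    ∀ (combs : List (List Int)) (group : String) (start level : Int) (l : List Int),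
      group.toList = enc l →
      combinationListGo fuel combs group start stop level = combs ++ specCombsGo fuel l start stop level := by
  induction fuel with
  | zero => intro combs group start level l _; simp [combinationListGo, specCombsGo]
  | succ f ih =>
    intro combs group start level l hg
    have henc : (group ++ "," ++ PySem.Int.toStr start).toList = enc (l ++ [start]) := by
      simp only [String.toList_append, hg, PySem.Int.toList_toStr]
      simp [enc]
    have hkey : List.map pyIntCanon
        ((PySem.Str.split? (PySem.Str.slice (group ++ "," ++ PySem.Int.toStr start) (some 1)) ",").getD []) =
        l ++ [start] := by
      have hs : (PySem.Str.slice (group ++ "," ++ PySem.Int.toStr start) (some 1)).toList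
          = (enc (l ++ [start])).drop 1 := by
        rw [PySem.Str.toList_slice]
        simp only [PySem.Chars.slice_eq_listSlice, henc]
        rw [PySem.List.slice_from _ (by norm_num)]
        rfl
      unfold PySem.Str.split? PySem.Chars.split?
      simp only [hs]
      rw [show (",".toList : List Char) = [','] from rfl]
      simp only [List.isEmpty_cons, Bool.false_eq_true, if_false, Option.map_some, Option.getD_some,
        List.map_map]
      exact parse_enc (l ++ [start]) (by simp)
    show combinationListGo f
        (combinationListGo f
          (if level = 0 then combs ++ [_] else combs)
          (group ++ "," ++ PySem.Int.toStr start) (start + 1) stop (level - 1))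
        group (start + 1) stop level = _
    rw [ih _ _ _ (level - 1) (l ++ [start]) henc, ih _ _ _ level l hg, hkey]
    show (if level = 0 then combs ++ [l ++ [start]] else combs) ++ _ ++ _ = _
    rw [show specCombsGo (f + 1) l start stop level =
      (if level = 0 then [l ++ [start]] else []) ++
        specCombsGo f (l ++ [start]) (start + 1) stop (level - 1) ++
        specCombsGo f l (start + 1) stop level from rfl]
    by_cases h0 : level = 0 <;> simp [h0]

theorem combList_spec (combs : List (List Int)) (group : String) (start stop level : Int)
    (l : List Int) (hg : group.toList = enc l) :
    combinationList combs group start stop level = combs ++ specCombs l start stop level :=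
  combListGo_spec (stop + 1 - start).toNat stop combs group start level l hg

theorem combsBGo_zero (fuel : Nat) (lo n : Int) : combsBGo fuel lo n 0 = [[]] := by
  cases fuel <;> simp [combsBGo]

theorem specCombsGo_eq_combsBGo (fuel : Nat) (stop : Int) : ∀ (l : List Int) (start level : Int),
    specCombsGo fuel l start stop level =
      if level < 0 then [] else (combsBGo fuel start (stop + 1) (level + 1)).map (l ++ ·) := by
  induction fuel with
  | zero =>
    intro l start level
    by_cases h : level < 0
    · simp [specCombsGo, h]
    · rw [if_neg h]
      show ([] : List (List Int)) = (combsBGo 0 start (stop + 1) (level + 1)).map (l ++ ·)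
      rw [show combsBGo 0 start (stop + 1) (level + 1) = if level + 1 = 0 then [[]] else [] from rfl]
      rw [if_neg (by omega)]
      simp
  | succ f ih =>
    intro l start level
    show (if level = 0 then [l ++ [start]] else []) ++
        specCombsGo f (l ++ [start]) (start + 1) stop (level - 1) ++
        specCombsGo f l (start + 1) stop level = _
    rw [ih (l ++ [start]) (start + 1) (level - 1), ih l (start + 1) level]
    by_cases hneg : level < 0
    · simp [hneg, show level - 1 < 0 by omega, show level ≠ 0 by omega]
    · rw [if_neg hneg]
      have hstep : combsBGo (f + 1) start (stop + 1) (level + 1)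
          = (combsBGo f (start + 1) (stop + 1) (level + 1 - 1)).map (start :: ·) ++
            combsBGo f (start + 1) (stop + 1) (level + 1) := by
        show (if level + 1 = 0 then [[]] else _) = _
        rw [if_neg (by omega)]
      have hsub : level + 1 - 1 = level := by omega
      rw [hsub] at hstep
      by_cases h0 : level = 0
      · subst h0
        simp only [show (0:Int) - 1 < 0 by omega, if_pos, hstep]
        norm_num [combsBGo_zero]
      · rw [if_neg (show ¬ level - 1 < 0 by omega), if_neg hneg, if_neg h0,
          show level - 1 + 1 = level by omega, hstep]
        simp [List.map_map, Function.comp_def]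

theorem specCombs_eq_combsB (l : List Int) (start stop level : Int) :
    specCombs l start stop level =
      if level < 0 then [] else (combsB start (stop + 1) (level + 1)).map (l ++ ·) := by
  unfold specCombs combsB
  rw [specCombsGo_eq_combsBGo (stop + 1 - start).toNat stop l start level,
    show (stop + 1 - start).toNat = (stop + 1 - start).toNat from rfl]

theorem combsBGo_mem_length (fuel : Nat) : ∀ (lo n r : Int), 0 ≤ r →
    ∀ c ∈ combsBGo fuel lo n r, (c.length : Int) = r := by
  induction fuel with
  | zero =>
    intro lo n r hr c hc
    by_cases h0 : r = 0
    · subst h0; rw [combsBGo_zero] at hc; simp at hc; simp [hc]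
    · rw [show combsBGo 0 lo n r = if r = 0 then [[]] else [] from rfl, if_neg h0] at hc
      simp at hc
  | succ f ih =>
    intro lo n r hr c hc
    by_cases h0 : r = 0
    · subst h0; rw [combsBGo_zero] at hc; simp at hc; simp [hc]
    · rw [show combsBGo (f + 1) lo n r
          = if r = 0 then [[]] else (combsBGo f (lo + 1) n (r - 1)).map (lo :: ·) ++ combsBGo f (lo + 1) n r from rfl,
        if_neg h0] at hc
      rcases List.mem_append.1 hc with hc | hc
      · rcases List.mem_map.1 hc with ⟨c', hc', rfl⟩
        have := ih (lo + 1) n (r - 1) (by omega) c' hc'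
        simp only [List.length_cons]
        push_cast
        omega
      · exact ih (lo + 1) n r hr c hc

theorem combsB_mem_length (lo n r : Int) (hr : 0 ≤ r) : ∀ c ∈ combsB lo n r, (c.length : Int) = r :=
  combsBGo_mem_length (n - lo).toNat lo n r hr

theorem combsBGo_mem_bounds (fuel : Nat) : ∀ (lo n r : Int), ∀ c ∈ combsBGo fuel lo n r,
    ∀ x ∈ c, lo ≤ x ∧ x < lo + fuel := by
  induction fuel with
  | zero =>
    intro lo n r c hc
    by_cases h0 : r = 0
    · subst h0; rw [combsBGo_zero] at hc; simp at hc; simp [hc]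
    · rw [show combsBGo 0 lo n r = if r = 0 then [[]] else [] from rfl, if_neg h0] at hc
      simp at hc
  | succ f ih =>
    intro lo n r c hc
    by_cases h0 : r = 0
    · subst h0; rw [combsBGo_zero] at hc; simp at hc; simp [hc]
    · rw [show combsBGo (f + 1) lo n r
          = if r = 0 then [[]] else (combsBGo f (lo + 1) n (r - 1)).map (lo :: ·) ++ combsBGo f (lo + 1) n r from rfl,
        if_neg h0] at hc
      rcases List.mem_append.1 hc with hc | hc
      · rcases List.mem_map.1 hc with ⟨c', hc', rfl⟩
        intro x hx
        rcases List.mem_cons.1 hx with rfl | hx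
        · constructor
          · omega
          · push_cast; omega
        · have := ih (lo + 1) n (r - 1) c' hc' x hx
          push_cast at this ⊢
          omega
      · intro x hx
        have := ih (lo + 1) n r c hc x hx
        push_cast at this ⊢
        omega

theorem combsB_mem_bounds (lo n r : Int) : ∀ c ∈ combsB lo n r, ∀ x ∈ c, lo ≤ x ∧ x < n := by
  intro c hc x hx
  have h := combsBGo_mem_bounds (n - lo).toNat lo n r c hc x hx
  by_cases hln : lo < n
  · constructor
    · exact h.1
    · have : lo + ((n - lo).toNat : Int) = n := by omega
      omega
  · exfalso
    have hf : (n - lo).toNat = 0 := by omega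
    unfold combsB at hc
    rw [hf] at hc
    by_cases h0 : r = 0
    · subst h0; rw [combsBGo_zero] at hc; simp at hc; subst hc; simp at hx
    · rw [show combsBGo 0 lo n r = if r = 0 then [[]] else [] from rfl, if_neg h0] at hc
      simp at hc

-- ---- the character-surgery loop is the membership map ----

theorem set_foldl_spec (b1 : Char) (c : List Int) : ∀ s : List Char, (∀ x ∈ c, 0 ≤ x ∧ x < (s.length : Int)) →
    c.foldl (fun s idx =>
        PySem.Chars.slice s none (some idx) ++ [b1] ++ PySem.Chars.slice s (some (idx + 1)) none) s
      = (List.range s.length).map (fun (p : Nat) => if ((p : Int) ∈ c) then b1 else s.getD p ' ') := by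
  induction c with
  | nil =>
    intro s _
    simp only [List.foldl_nil, List.not_mem_nil, if_false]
    exact (List.ext_getElem (by simp) (by
      intro i h1 h2
      simp [List.getD_eq_getElem?_getD, h2])).symm
  | cons idx rest ih =>
    intro s hb
    obtain ⟨hi0, hilen⟩ := hb idx (List.mem_cons_self)
    have hset : PySem.Chars.slice s none (some idx) ++ [b1] ++ PySem.Chars.slice s (some (idx + 1)) none
        = s.set idx.toNat b1 := by
      simp only [PySem.Chars.slice_eq_listSlice]
      rw [PySem.List.slice_to _ hi0, PySem.List.slice_from _ (by omega)]
      rw [List.set_eq_take_cons_drop b1 (show idx.toNat < s.length by omega)]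
      have : (idx + 1).toNat = idx.toNat + 1 := by omega
      rw [this]
      simp
    simp only [List.foldl_cons, hset]
    rw [ih (s.set idx.toNat b1) (by intro x hx; have := hb x (List.mem_cons_of_mem _ hx); simpa using this)]
    apply List.ext_getElem (by simp)
    intro p h1 h2
    simp only [List.length_set] at h1 h2
    simp only [List.getElem_map, List.getElem_range]
    by_cases hpr : (p : Int) ∈ rest
    · simp [hpr]
    · simp only [if_false, List.mem_cons, hpr, or_false]
      by_cases hpi : (p : Int) = idx
      · have : p = idx.toNat := by omega
        subst this
        simp only [hpi, if_true, List.getD_eq_getElem?_getD, List.getElem?_set_self']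
        simp [List.getElem?_eq_getElem (show idx.toNat < s.length by omega)]
      · have hne : p ≠ idx.toNat := by omega
        simp only [hpi, if_false, List.getD_eq_getElem?_getD]
        rw [List.getElem?_set_ne (by omega)]

theorem subDet_eq (n k : Int) (hk : 0 ≤ k) (bit : String) (b0 b1 : Char)
    (h0 : PySem.Str.pyGet? bit 0 = some b0) (h1 : PySem.Str.pyGet? bit 1 = some b1) :
    subDeterminant n k bit =
      (combsB 0 n (k + 1)).map (fun c =>
        String.ofList ((PySem.List.pyRange 0 n).map (fun p => if p ∈ c then b1 else b0))) := by
  unfold subDeterminant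
  have hcomb : combinationList [] "" 0 (n - 1) k = combsB 0 n (k + 1) := by
    rw [combList_spec [] "" 0 (n - 1) k [] (by simp [enc])]
    rw [specCombs_eq_combsB, if_neg (by omega), show n - 1 + 1 = n by omega]
    simp
  rw [hcomb, h0, h1]
  simp only [Option.getD_some]
  rw [PySem.List.foldl_append_singleton_eq_map]
  simp only [List.nil_append]
  apply List.map_congr_left
  intro c hc
  have hlen : (c.length : Int) = k + 1 := combsB_mem_length 0 n (k + 1) (by omega) c hc
  have hbnd := combsB_mem_bounds 0 n (k + 1) c hc
  congr 1
  have hrange : PySem.List.pyRange 0 (k + 1) = PySem.List.pyRange 0 (PySem.List.len c) := by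
    simp [PySem.List.len, hlen]
  rw [hrange, PySem.List.foldl_pyRange_zero_pyGetD c (0 : Int)
    (fun s idx => PySem.Chars.slice s none (some idx) ++ [b1] ++ PySem.Chars.slice s (some (idx + 1)) none)
    (List.replicate n.toNat b0)]
  rw [set_foldl_spec b1 c (List.replicate n.toNat b0) (by
    intro x hx
    have := hbnd x hx
    constructor
    · omega
    · simp only [List.length_replicate]
      omega)]
  simp only [List.length_replicate]
  rw [PySem.List.pyRange_one]
  simp only [List.map_map, Int.sub_zero]
  apply List.map_congr_left
  intro q hq
  have hqlt : q < n.toNat := List.mem_range.1 hq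
  simp only [Function.comp_apply, zero_add]
  by_cases hm : (q : Int) ∈ c
  · simp [hm]
  · simp [hm, List.getD_eq_getElem?_getD, List.getElem?_eq_getElem (show q < (List.replicate n.toNat b0).length by simpa using hqlt)]

theorem subDet_pre (n k : Int) (hk : 0 ≤ k) :
    subDeterminant n k "10" = (combsB 0 n (k + 1)).map (fun c => excString c n '0' '1') := by
  rw [subDet_eq n k hk "10" '1' '0' (by decide) (by decide)]
  rfl

theorem subDet_post (n k : Int) (hk : 0 ≤ k) :
    subDeterminant n k "01" = (combsB 0 n (k + 1)).map (fun c => excString c n '1' '0') := by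
  rw [subDet_eq n k hk "01" '0' '1' (by decide) (by decide)]
  rfl

-- ===== VERDICT (by name: the statement is the Claim_ definition above) =====
theorem configurations_spec : Claim_equal_configurations := by
  unfold Claim_equal_configurations Spec_configurations
  intro nE nO type _ _
  unfold configurations configurations_alt
  simp only [List.foldl_cons, List.foldl_nil,
    PySem.List.foldl_append_singleton_eq_map, PySem.List.foldl_append_eq_flatMap,
    subDet_pre nE 0 (by norm_num), subDet_post (nO - nE) 0 (by norm_num),
    subDet_pre nE 1 (by norm_num), subDet_post (nO - nE) 1 (by norm_num),
    subDet_pre nE 2 (by norm_num), subDet_post (nO - nE) 2 (by norm_num),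
    subDet_pre nE 3 (by norm_num), subDet_post (nO - nE) 3 (by norm_num)]
  simp only [List.nil_append]
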